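-- pv_equiv track=rewrite | github.com/AyoubELGUELTA/proto-project | backend-python/app/services/graph/graph_service.py | _apply_transitive_mapping
-- ===== SOURCE A (Python) =====
-- def _apply_transitive_mapping(mapping: dict) -> dict:
--     """A -> B, B -> C  => A -> C"""
--     final_map = {}
--     for key in mapping:
--         path = set([key])
--         current = mapping[key]
--         while current in mapping and current not in path:
--             path.add(current)
--             current = mapping[current]
--         final_map[key] = current
--     return final_map
-- ===== SOURCE B (Python) =====
-- def _apply_transitive_mapping(mapping: dict) -> dict:
--     """A -> B, B -> C  => A -> C  (each node's final target is computed once and memoized)"""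
--     memo = {}
--     final_map = {}
--     for key in mapping:
--         if key not in memo:
--             path = []
--             seen = set()
--             cur = key
--             while cur in mapping and cur not in seen and cur not in memo:
--                 seen.add(cur)
--                 path.append(cur)
--                 cur = mapping[cur]
--             if cur in memo:                # reached an already-resolved node
--                 res = memo[cur]
--                 for p in path:
--                     memo[p] = res
--             elif cur in seen:              # walk closed a cycle at cur
--                 j = path.index(cur)
--                 for p in path[:j]:
--                     memo[p] = cur
--                 for p in path[j:]:
--                     memo[p] = p
--             else:                          # cur is not a key: terminal node
--                 for p in path:
--                     memo[p] = cur
--         final_map[key] = memo[key]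
--     return final_map
-- ===== Notes on version B (the rewrite author's own statement) =====
-- stated objective: alternative
-- what changed: A re-walks the whole chain from scratch for every key; B resolves each node once, memoizing the final target of every node visited on a walk (path compression: terminal walks map the whole path to the endpoint, cycle members to themselves, pre-cycle nodes to the cycle entry) and reuses memoized targets mid-walk.
import Mathlib
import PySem

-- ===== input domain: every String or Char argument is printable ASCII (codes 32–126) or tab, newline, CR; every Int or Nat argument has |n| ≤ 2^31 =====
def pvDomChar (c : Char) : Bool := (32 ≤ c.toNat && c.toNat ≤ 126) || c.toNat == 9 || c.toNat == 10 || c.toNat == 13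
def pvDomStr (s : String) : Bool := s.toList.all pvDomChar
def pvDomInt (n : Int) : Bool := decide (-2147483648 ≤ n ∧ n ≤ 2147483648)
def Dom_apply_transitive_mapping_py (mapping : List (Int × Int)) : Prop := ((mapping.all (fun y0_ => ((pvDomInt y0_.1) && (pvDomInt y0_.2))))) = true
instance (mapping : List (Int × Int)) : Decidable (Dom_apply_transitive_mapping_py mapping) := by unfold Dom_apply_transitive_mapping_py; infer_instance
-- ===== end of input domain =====

-- B memoizes the final target of every node it walks over (path compression), so each
-- node's chain is resolved once and reused for later keys; same return value as A.

-- termination measure lemma cited by the ports' `decreasing_by` (keys of d not yet on the path shrink)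
theorem pvFilterLt (keys S : List Int) (c : Int) (hc : c ∈ keys) (hS : c ∉ S) :
    (keys.filter fun k => !((S ++ [c]).contains k)).length <
      (keys.filter fun k => !(S.contains k)).length := by
  have hpred : ∀ k : Int, (!((S ++ [c]).contains k)) = ((!(k == c)) && (!(S.contains k))) := by
    intro k
    by_cases h1 : k = c <;> by_cases h2 : k ∈ S <;> simp_all
  rw [List.filter_congr (fun x _ => hpred x), ← List.filter_filter]
  exact List.length_filter_lt_length_iff_exists.mpr
    ⟨c, List.mem_filter.mpr ⟨hc, by simpa using hS⟩, by simp⟩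

-- ===== PORT A =====
-- A's while loop: `path` is the Python set (PySem.Set over Int), `current` follows the dict.
def pvAWalk (d : PySem.Dict Int Int) (path : List Int) (current : Int) : Int :=
  if h : d.contains current = true ∧ PySem.Set.contains path current = false then
    pvAWalk d (PySem.Set.add path current) (d.getD current 0)
  else current
termination_by (d.keys.filter fun k => !(path.contains k)).length
decreasing_by
  rw [PySem.Set.add_of_not_mem (by simpa using h.2)]
  exact pvFilterLt d.keys path current
    ((PySem.Dict.contains_iff_mem_keys d current).mp h.1) (by simpa using h.2)

def apply_transitive_mapping_py (mapping : List (Int × Int)) : List (Int × Int) :=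
  let d := PySem.Dict.ofList mapping
  (d.keys.foldl
    (fun final_map key =>
      final_map.insert key (pvAWalk d (PySem.Set.ofList [key]) (d.getD key 0)))
    PySem.Dict.empty).items

-- ===== PORT B =====
-- Source B's inner while loop.  Source B keeps `seen` (a set) with exactly the elements of `path`
-- (every appended element is new), so the port tests membership on `path` itself.
def pvBWalk (d memo : PySem.Dict Int Int) (path : List Int) (cur : Int) : List Int × Int :=
  if h : d.contains cur = true ∧ path.contains cur = false ∧ memo.contains cur = false then
    pvBWalk d memo (path ++ [cur]) (d.getD cur 0)
  else (path, cur)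
termination_by (d.keys.filter fun k => !(path.contains k)).length
decreasing_by
  exact pvFilterLt d.keys path cur
    ((PySem.Dict.contains_iff_mem_keys d cur).mp h.1) (by simpa using h.2.1)

-- the body of Source B's `if key not in memo:` block: walk, then fill memo for the whole path.
-- `path.index(cur)` is guarded by `cur in path`, so index? is some; `.getD 0` is unreached.
def pvBResolve (d memo : PySem.Dict Int Int) (key : Int) : PySem.Dict Int Int :=
  let w := pvBWalk d memo [] key
  let path := w.1
  let cur := w.2
  if memo.contains cur then
    let res := memo.getD cur 0
    path.foldl (fun mm p => mm.insert p res) memo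
  else if path.contains cur then
    let j : Int := (((PySem.List.index? path cur).getD 0 : Nat) : Int)
    let mm := (PySem.List.slice path none (some j)).foldl (fun mm p => mm.insert p cur) memo
    (PySem.List.slice path (some j) none).foldl (fun mm p => mm.insert p p) mm
  else
    path.foldl (fun mm p => mm.insert p cur) memo

-- one iteration of Source B's `for key in mapping` loop over state (memo, final_map)
def pvBStep (d : PySem.Dict Int Int) (st : PySem.Dict Int Int × PySem.Dict Int Int)
    (key : Int) : PySem.Dict Int Int × PySem.Dict Int Int :=
  let memo := if st.1.contains key then st.1 else pvBResolve d st.1 key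
  (memo, st.2.insert key (memo.getD key 0))

def apply_transitive_mapping_py_alt (mapping : List (Int × Int)) : List (Int × Int) :=
  let d := PySem.Dict.ofList mapping
  ((d.keys.foldl (pvBStep d) (PySem.Dict.empty, PySem.Dict.empty)).2).items

-- ===== PRECONDITION & SPEC =====
def Spec_apply_transitive_mapping_py (mapping : List (Int × Int)) (out : List (Int × Int)) : Prop := out = apply_transitive_mapping_py_alt mapping
instance (mapping : List (Int × Int)) (out : List (Int × Int)) : Decidable (Spec_apply_transitive_mapping_py mapping out) := by unfold Spec_apply_transitive_mapping_py; infer_instance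

-- ===== CLAIM (what is proved, stated in full; the proofs are below) =====
def Claim_equal_apply_transitive_mapping_py : Prop := ∀ (mapping : List (Int × Int)), Dom_apply_transitive_mapping_py mapping → Spec_apply_transitive_mapping_py mapping (apply_transitive_mapping_py mapping)

-- ===== LEMMAS AND PROOFS =====

-- A's per-key result (exactly the expression A's loop body computes for `key`)
def pvResA (d : PySem.Dict Int Int) (k : Int) : Int :=
  pvAWalk d (PySem.Set.ofList [k]) (d.getD k 0)

-- proof-side cons-structured version of pvBWalk (returns only the newly visited nodes)
def pvCW (d m : PySem.Dict Int Int) (S : List Int) (c : Int) : List Int × Int :=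
  if h : d.contains c = true ∧ S.contains c = false ∧ m.contains c = false then
    ((c :: (pvCW d m (S ++ [c]) (d.getD c 0)).1), (pvCW d m (S ++ [c]) (d.getD c 0)).2)
  else ([], c)
termination_by (d.keys.filter fun k => !(S.contains k)).length
decreasing_by
  exact pvFilterLt d.keys S c
    ((PySem.Dict.contains_iff_mem_keys d c).mp h.1) (by simpa using h.2.1)

theorem pvCW_guard_true (d m : PySem.Dict Int Int) (S : List Int) (c : Int)
    (h1 : d.contains c = true) (h2 : S.contains c = false) (h3 : m.contains c = false) :
    pvCW d m S c = ((c :: (pvCW d m (S ++ [c]) (d.getD c 0)).1),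
      (pvCW d m (S ++ [c]) (d.getD c 0)).2) := by
  rw [pvCW, dif_pos ⟨h1, h2, h3⟩]

theorem pvCW_guard_false (d m : PySem.Dict Int Int) (S : List Int) (c : Int)
    (h : ¬(d.contains c = true ∧ S.contains c = false ∧ m.contains c = false)) :
    pvCW d m S c = ([], c) := by
  rw [pvCW, dif_neg h]

theorem pvBWalk_eq_pvCW (d m : PySem.Dict Int Int) :
    ∀ (S : List Int) (c : Int),
      pvBWalk d m S c = (S ++ (pvCW d m S c).1, (pvCW d m S c).2) := by
  intro S c
  fun_induction pvCW d m S c with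
  | case1 S c h ih =>
    rw [pvBWalk, dif_pos h, ih]
    simp
  | case2 S c h =>
    rw [pvBWalk, dif_neg h]
    simp

theorem pvCW_elem (d m : PySem.Dict Int Int) :
    ∀ (S : List Int) (c : Int), ∀ q ∈ (pvCW d m S c).1,
      d.contains q = true ∧ m.contains q = false ∧ S.contains q = false := by
  intro S c
  fun_induction pvCW d m S c with
  | case1 S c h ih =>
    intro q hq
    rcases List.mem_cons.mp hq with rfl | hq'
    · exact ⟨h.1, h.2.2, h.2.1⟩
    · obtain ⟨h1, h2, h3⟩ := ih q hq'
      refine ⟨h1, h2, ?_⟩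
      simp only [List.contains_append] at h3
      exact (Bool.or_eq_false_iff.mp h3).1
  | case2 S c h => intro q hq; simp at hq

theorem pvCW_nodup (d m : PySem.Dict Int Int) :
    ∀ (S : List Int) (c : Int), (pvCW d m S c).1.Nodup := by
  intro S c
  fun_induction pvCW d m S c with
  | case1 S c h ih =>
    refine List.nodup_cons.mpr ⟨?_, ih⟩
    intro hmem
    have h3 := (pvCW_elem d m (S ++ [c]) (d.getD c 0) c hmem).2.2
    simp at h3
  | case2 S c h => simp

theorem pvCW_sub (d m : PySem.Dict Int Int) :
    ∀ (S : List Int) (c : Int) (Q₁ : List Int) (p : Int) (Q₂ : List Int),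
      (pvCW d m S c).1 = Q₁ ++ p :: Q₂ →
      (pvCW d m (S ++ Q₁) p).1 = p :: Q₂ ∧ (pvCW d m (S ++ Q₁) p).2 = (pvCW d m S c).2 := by
  intro S c
  fun_induction pvCW d m S c with
  | case1 S c h ih =>
    intro Q₁ p Q₂ hsplit
    simp only at hsplit
    cases Q₁ with
    | nil =>
      simp only [List.nil_append, List.cons.injEq] at hsplit
      obtain ⟨rfl, h2⟩ := hsplit
      simp only [List.append_nil]
      rw [pvCW_guard_true d m S c h.1 h.2.1 h.2.2]
      simp [h2]
    | cons a Q₁' =>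
      simp only [List.cons_append, List.cons.injEq] at hsplit
      obtain ⟨rfl, ht⟩ := hsplit
      have := ih Q₁' p Q₂ ht
      rwa [List.append_assoc S [c] Q₁', List.singleton_append] at this
  | case2 S c h =>
    intro Q₁ p Q₂ hsplit
    simp at hsplit

theorem pvCW_exit (d m : PySem.Dict Int Int) :
    ∀ (S : List Int) (c : Int), d.contains (pvCW d m S c).2 = true →
      (S ++ (pvCW d m S c).1).contains (pvCW d m S c).2 = true ∨
        m.contains (pvCW d m S c).2 = true := by
  intro S c
  fun_induction pvCW d m S c with
  | case1 S c h ih =>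
    intro hcont
    simp only at hcont ⊢
    rcases ih hcont with h1 | h2
    · left
      have he : (S ++ [c]) ++ (pvCW d m (S ++ [c]) (d.getD c 0)).1 =
          S ++ c :: (pvCW d m (S ++ [c]) (d.getD c 0)).1 := by simp
      rwa [he] at h1
    · right; exact h2
  | case2 S c h =>
    intro hcont
    simp only [List.append_nil]
    by_cases hS : S.contains c = true
    · left; exact hS
    · right
      by_cases hm : m.contains c = true
      · exact hm
      · exact absurd ⟨hcont, by simpa using hS, by simpa using hm⟩ h

theorem pvAWalk_stop_not_key (d : PySem.Dict Int Int) (S : List Int) (c : Int)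
    (h : d.contains c = false) : pvAWalk d S c = c := by
  rw [pvAWalk]; simp [h]

theorem pvAWalk_stop_mem (d : PySem.Dict Int Int) (S : List Int) (c : Int)
    (h : c ∈ S) : pvAWalk d S c = c := by
  rw [pvAWalk]; simp [h]

theorem pvAWalk_step (d : PySem.Dict Int Int) (S : List Int) (c : Int)
    (h1 : d.contains c = true) (h2 : c ∉ S) :
    pvAWalk d S c = pvAWalk d (S ++ [c]) (d.getD c 0) := by
  rw [pvAWalk]
  rw [dif_pos ⟨h1, by simpa using h2⟩, PySem.Set.add_of_not_mem h2]

theorem pvFind?_congr {α : Type} (l : List α) (p q : α → Bool)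
    (h : ∀ x ∈ l, p x = q x) : l.find? p = l.find? q := by
  induction l with
  | nil => rfl
  | cons a t ih =>
    simp only [List.find?_cons]
    rw [h a (by simp)]
    cases hq : q a
    · exact ih fun x hx => h x (by simp [hx])
    · rfl

-- the A-walk from any path-set S' follows a pvCW run until it meets an element of S'
theorem pvFollow (d m : PySem.Dict Int Int) :
    ∀ (S : List Int) (c : Int) (S' : List Int),
      pvAWalk d S' c =
        (match (pvCW d m S c).1.find? (fun q => S'.contains q) with
         | some q => q
         | none => pvAWalk d (S' ++ (pvCW d m S c).1) (pvCW d m S c).2) := by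
  intro S c
  fun_induction pvCW d m S c with
  | case1 S c h ih =>
    intro S'
    simp only
    by_cases hS' : c ∈ S'
    · rw [pvAWalk_stop_mem d S' c hS',
        List.find?_cons_of_pos (by simpa using hS')]
    · have hc' : S'.contains c = false := by simpa using hS'
      rw [pvAWalk_step d S' c h.1 hS', ih (S' ++ [c])]
      have hcong : (pvCW d m (S ++ [c]) (d.getD c 0)).1.find?
            (fun q => (S' ++ [c]).contains q) =
          (pvCW d m (S ++ [c]) (d.getD c 0)).1.find? (fun q => S'.contains q) := by
        apply pvFind?_congr
        intro x hx
        have hne : x ≠ c := by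
          intro he
          have := (pvCW_elem d m (S ++ [c]) (d.getD c 0) x hx).2.2
          simp [he] at this
        simp [List.contains_append, hne]
      rw [hcong, List.find?_cons_of_neg (by simpa using hS')]
      cases hfind : (pvCW d m (S ++ [c]) (d.getD c 0)).1.find? (fun q => S'.contains q) with
      | some q => rfl
      | none => simp [List.append_assoc]
  | case2 S c h =>
    intro S'
    simp

-- if the successors of memoized nodes stay memoized (or leave the keys), the A-walk
-- from a memoized node does not depend on path-set elements outside the memo
theorem pvWClosed (d m : PySem.Dict Int Int)
    (hcl : ∀ x, m.contains x = true →
      d.contains x = true ∧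
        (d.contains (d.getD x 0) = false ∨ m.contains (d.getD x 0) = true)) :
    ∀ (S₁ : List Int) (c : Int) (S₂ : List Int),
      (m.contains c = true ∨ d.contains c = false) →
      (∀ y, m.contains y = true → (S₁.contains y = S₂.contains y)) →
      pvAWalk d S₁ c = pvAWalk d S₂ c := by
  intro S₁ c
  fun_induction pvAWalk d S₁ c with
  | case1 S₁ c h ih =>
    intro S₂ hc hS
    have hcm : m.contains c = true := by
      rcases hc with h' | h'
      · exact h'
      · rw [h.1] at h'; exact absurd h' (by simp)
    have hS₁ : S₁.contains c = false := by simpa using h.2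
    have hS₂ : S₂.contains c = false := by rw [← hS c hcm]; exact hS₁
    rw [pvAWalk_step d S₂ c h.1 (by simpa using hS₂)]
    rw [PySem.Set.add_of_not_mem (by simpa using h.2 : c ∉ S₁)] at ih ⊢
    apply ih
    · rcases (hcl c hcm).2 with h' | h'
      · right; exact h'
      · left; exact h'
    · intro y hy
      have h' : (y ∈ S₁) ↔ (y ∈ S₂) := by simpa using hS y hy
      simp [List.contains_append, h']
  | case2 S₁ c h =>
    intro S₂ hc hS
    by_cases hcd : d.contains c = true
    · have hS₁ : PySem.Set.contains S₁ c = true := by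
        by_contra h'
        exact h ⟨hcd, by simpa using h'⟩
      have hcm : m.contains c = true := by
        rcases hc with h' | h'
        · exact h'
        · rw [hcd] at h'; exact absurd h' (by simp)
      have hS₂ : S₂.contains c = true := by
        rw [← hS c hcm]; simpa using hS₁
      rw [pvAWalk_stop_mem d S₂ c (by simpa using hS₂)]
    · rw [pvAWalk_stop_not_key d S₂ c (by simpa using hcd)]

theorem pvCW_head (d m : PySem.Dict Int Int) (S : List Int) (c q : Int) (Q' : List Int)
    (h : (pvCW d m S c).1 = q :: Q') : q = c := by
  by_cases hg : d.contains c = true ∧ S.contains c = false ∧ m.contains c = false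
  · rw [pvCW_guard_true d m S c hg.1 hg.2.1 hg.2.2] at h
    simp only [List.cons.injEq] at h
    exact h.1.symm
  · rw [pvCW_guard_false d m S c hg] at h
    simp at h

theorem pvCW_nil (d m : PySem.Dict Int Int) (S : List Int) (c : Int)
    (h : (pvCW d m S c).1 = []) : (pvCW d m S c).2 = c := by
  by_cases hg : d.contains c = true ∧ S.contains c = false ∧ m.contains c = false
  · rw [pvCW_guard_true d m S c hg.1 hg.2.1 hg.2.2] at h
    simp at h
  · rw [pvCW_guard_false d m S c hg]

-- inner run just after p: drop the head of a suffix run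
theorem pvCW_after (d m : PySem.Dict Int Int) (S : List Int) (c : Int)
    (Q₁ : List Int) (p : Int) (Q₂ : List Int)
    (hsplit : (pvCW d m S c).1 = Q₁ ++ p :: Q₂) :
    (pvCW d m ((S ++ Q₁) ++ [p]) (d.getD p 0)).1 = Q₂ ∧
      (pvCW d m ((S ++ Q₁) ++ [p]) (d.getD p 0)).2 = (pvCW d m S c).2 := by
  obtain ⟨hsub1, hsub2⟩ := pvCW_sub d m S c Q₁ p Q₂ hsplit
  have hp : p = p := rfl
  have hg : d.contains p = true ∧ (S ++ Q₁).contains p = false ∧ m.contains p = false := by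
    by_contra hg
    rw [pvCW_guard_false d m (S ++ Q₁) p hg] at hsub1
    simp at hsub1
  rw [pvCW_guard_true d m (S ++ Q₁) p hg.1 hg.2.1 hg.2.2] at hsub1 hsub2
  simp only at hsub1 hsub2
  exact ⟨((List.cons.injEq _ _ _ _).mp hsub1).2, hsub2⟩

theorem pvVal (d m : PySem.Dict Int Int) (S : List Int) (c : Int)
    (Q₁ : List Int) (p : Int) (Q₂ : List Int)
    (hsplit : (pvCW d m S c).1 = Q₁ ++ p :: Q₂) :
    pvResA d p = pvAWalk d (p :: Q₂) (pvCW d m S c).2 := by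
  obtain ⟨hin1, hin2⟩ := pvCW_after d m S c Q₁ p Q₂ hsplit
  have hnd : (p :: Q₂).Nodup := by
    have := pvCW_nodup d m (S ++ Q₁) p
    rw [(pvCW_sub d m S c Q₁ p Q₂ hsplit).1] at this
    exact this
  have hfollow := pvFollow d m ((S ++ Q₁) ++ [p]) (d.getD p 0) [p]
  rw [hin1, hin2] at hfollow
  have hnone : Q₂.find? (fun q => [p].contains q) = none := by
    apply List.find?_eq_none.mpr
    intro x hx
    have : x ≠ p := by
      intro rfl_
      exact (List.nodup_cons.mp hnd).1 (rfl_ ▸ hx)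
    simp [this]
  rw [hnone] at hfollow
  have hof : PySem.Set.ofList [p] = [p] := rfl
  rw [pvResA, hof]
  simpa using hfollow

-- memo update folds
theorem pvGetDFoldl (xs : List Int) (v : Int → Int) :
    ∀ (m : PySem.Dict Int Int) (y : Int),
      (xs.foldl (fun mm p => mm.insert p (v p)) m).getD y 0 =
        if y ∈ xs then v y else m.getD y 0 := by
  induction xs with
  | nil => simp
  | cons x t ih =>
    intro m y
    simp only [List.foldl_cons, ih]
    by_cases hyt : y ∈ t
    · simp [hyt]
    · by_cases hyx : y = x
      · subst hyx; simp [hyt, PySem.Dict.getD_insert]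
      · simp [hyt, hyx, PySem.Dict.getD_insert]

theorem pvContainsFoldl (xs : List Int) (v : Int → Int) :
    ∀ (m : PySem.Dict Int Int) (y : Int),
      (xs.foldl (fun mm p => mm.insert p (v p)) m).contains y =
        (decide (y ∈ xs) || m.contains y) := by
  induction xs with
  | nil => simp
  | cons x t ih =>
    intro m y
    simp only [List.foldl_cons, ih, PySem.Dict.contains_insert]
    by_cases hyx : y = x <;> by_cases hyt : y ∈ t <;> simp [hyx, hyt]

theorem pvNodupFoldl (xs : List Int) (v : Int → Int) (m : PySem.Dict Int Int)
    (h : m.keys.Nodup) :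
    (xs.foldl (fun mm p => mm.insert p (v p)) m).keys.Nodup :=
  PySem.Dict.nodup_keys_foldl_insert xs (fun _ p => v p) m h

-- the successor of a path node is the next path node, or the walk's final value
theorem pvLink (d m : PySem.Dict Int Int) (S : List Int) (c : Int)
    (Q₁ : List Int) (p : Int) (Q₂ : List Int)
    (hsplit : (pvCW d m S c).1 = Q₁ ++ p :: Q₂) :
    d.getD p 0 = (match Q₂ with | [] => (pvCW d m S c).2 | q :: _ => q) := by
  obtain ⟨hin1, hin2⟩ := pvCW_after d m S c Q₁ p Q₂ hsplit
  cases Q₂ with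
  | nil =>
    rw [← hin2]
    exact (pvCW_nil d m _ _ hin1).symm
  | cons q rest =>
    exact (pvCW_head d m _ _ q rest hin1).symm

theorem pvIndexAppend (B₁ B₂ : List Int) (w : Int) (h : w ∉ B₁) :
    PySem.List.index? (B₁ ++ w :: B₂) w = some B₁.length := by
  induction B₁ with
  | nil => simpa using PySem.List.index?_cons_self w B₂
  | cons a t ih =>
    have ha : a ≠ w := by intro e; exact h (by simp [e])
    have ht : w ∉ t := fun e => h (by simp [e])
    rw [List.cons_append, PySem.List.index?_cons_of_ne _ ha, ih ht]
    simp

-- the memo invariant maintained across keys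
def pvInv (d m : PySem.Dict Int Int) : Prop :=
  m.keys.Nodup ∧ ∀ x, m.contains x = true →
    d.contains x = true ∧ m.getD x 0 = pvResA d x ∧
      (d.contains (d.getD x 0) = false ∨ m.contains (d.getD x 0) = true)

theorem pvResolveStep (d m : PySem.Dict Int Int) (k : Int)
    (hInv : pvInv d m) (hk : d.contains k = true) (hkm : m.contains k = false) :
    pvInv d (pvBResolve d m k) ∧ (pvBResolve d m k).contains k = true := by
  obtain ⟨hndm, hval⟩ := hInv
  have hcl : ∀ x, m.contains x = true →
      d.contains x = true ∧
        (d.contains (d.getD x 0) = false ∨ m.contains (d.getD x 0) = true) :=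
    fun x hx => ⟨(hval x hx).1, (hval x hx).2.2⟩
  obtain ⟨Q, w, hcw⟩ : ∃ Q w, pvCW d m [] k = (Q, w) := ⟨_, _, rfl⟩
  have h1 : (pvCW d m [] k).1 = Q := by rw [hcw]
  have h2 : (pvCW d m [] k).2 = w := by rw [hcw]
  have hwalk : pvBWalk d m [] k = (Q, w) := by
    rw [pvBWalk_eq_pvCW, h1, h2]; simp
  have helem : ∀ q ∈ Q, d.contains q = true ∧ m.contains q = false :=
    fun q hq => ⟨(pvCW_elem d m [] k q (h1 ▸ hq)).1, (pvCW_elem d m [] k q (h1 ▸ hq)).2.1⟩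
  have hndQ : Q.Nodup := h1 ▸ pvCW_nodup d m [] k
  have hkQ : k ∈ Q := by
    have := pvCW_guard_true d m [] k hk (by simp) hkm
    rw [hcw] at this
    rw [(Prod.mk.injEq _ _ _ _).mp this |>.1]
    simp
  have hsucc : ∀ q ∈ Q, d.getD q 0 ∈ Q ∨ d.getD q 0 = w := by
    intro q hq
    obtain ⟨Q₁, Q₂, hsp⟩ := List.append_of_mem hq
    have hlink := pvLink d m [] k Q₁ q Q₂ (by rw [h1, hsp])
    rw [h2] at hlink
    cases Q₂ with
    | nil =>
      right
      exact hlink.trans rfl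
    | cons q' rest =>
      left
      have hq' : d.getD q 0 = q' := hlink.trans rfl
      rw [hq', hsp]
      simp
  -- per-element value of q ∈ Q under A's walk, as a function of (Q₂, w)
  have hvalQ : ∀ (Q₁ : List Int) (q : Int) (Q₂ : List Int), Q = Q₁ ++ q :: Q₂ →
      pvResA d q = pvAWalk d (q :: Q₂) w := by
    intro Q₁ q Q₂ hsp
    have := pvVal d m [] k Q₁ q Q₂ (by rw [h1, hsp])
    rwa [h2] at this
  -- generic: a memo covering exactly Q ∪ old, with correct values, satisfies the invariant
  have hmk : ∀ (M : PySem.Dict Int Int),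
      (d.contains w = false ∨ w ∈ Q ∨ m.contains w = true) →
      M.keys.Nodup →
      (∀ x, M.contains x = true ↔ (x ∈ Q ∨ m.contains x = true)) →
      (∀ x, M.contains x = true → M.getD x 0 = pvResA d x) →
      pvInv d M ∧ M.contains k = true := by
    intro M hw' hMnd hMc hMg
    refine ⟨⟨hMnd, ?_⟩, (hMc k).mpr (Or.inl hkQ)⟩
    intro x hx
    have hdx : d.contains x = true := by
      rcases (hMc x).mp hx with h | h
      · exact (helem x h).1
      · exact (hval x h).1
    refine ⟨hdx, hMg x hx, ?_⟩
    rcases (hMc x).mp hx with h | h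
    · rcases hsucc x h with h' | h'
      · right; exact (hMc _).mpr (Or.inl h')
      · rw [h']
        rcases hw' with hh | hh | hh
        · left; exact hh
        · right; exact (hMc _).mpr (Or.inl hh)
        · right; exact (hMc _).mpr (Or.inr hh)
    · rcases (hval x h).2.2 with h' | h'
      · left; exact h'
      · right; exact (hMc _).mpr (Or.inr h')
  have hred : pvBResolve d m k =
      (if m.contains w then Q.foldl (fun mm p => mm.insert p (m.getD w 0)) m
       else if Q.contains w then
        (PySem.List.slice Q (some (((PySem.List.index? Q w).getD 0 : Nat) : Int)) none).foldl
          (fun mm p => mm.insert p p)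
          ((PySem.List.slice Q none (some (((PySem.List.index? Q w).getD 0 : Nat) : Int))).foldl
            (fun mm p => mm.insert p w) m)
       else Q.foldl (fun mm p => mm.insert p w) m) := by
    simp only [pvBResolve, hwalk]
  rw [hred]
  by_cases hmw : m.contains w = true
  · -- branch 1: the walk reached an already-memoized node w
    rw [if_pos hmw]
    have hwd : d.contains w = true := (hval w hmw).1
    have hwQ : w ∉ Q := by
      intro hin
      have := (helem w hin).2
      rw [hmw] at this
      exact absurd this (by simp)
    have hresQ : ∀ q ∈ Q, pvResA d q = m.getD w 0 := by
      intro q hq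
      obtain ⟨Q₁, Q₂, hsp⟩ := List.append_of_mem hq
      have hVal := hvalQ Q₁ q Q₂ hsp
      have hsub : ∀ x, x ∈ q :: Q₂ → x ∈ Q := by
        intro x hx
        rw [hsp]
        rcases List.mem_cons.mp hx with rfl | hx'
        · simp
        · simp [hx']
      have hwn : w ∉ q :: Q₂ := fun hin => hwQ (hsub w hin)
      rw [pvAWalk_step d (q :: Q₂) w hwd hwn] at hVal
      have hclosed := pvWClosed d m hcl ((q :: Q₂) ++ [w]) (d.getD w 0) [w]
        (by
          rcases (hval w hmw).2.2 with h' | h'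
          · right; exact h'
          · left; exact h')
        (by
          intro y hy
          have hyQ : y ∉ Q := by
            intro hin
            have := (helem y hin).2
            rw [hy] at this
            exact absurd this (by simp)
          have hyn : y ∉ q :: Q₂ := fun hin => hyQ (hsub y hin)
          simp only [List.mem_cons, not_or] at hyn
          simp [List.contains_append, hyn.1, hyn.2])
      rw [hclosed] at hVal
      rw [(hval w hmw).2.1, hVal]
      rfl
    refine hmk _ (Or.inr (Or.inr hmw)) (pvNodupFoldl Q _ m hndm) ?_ ?_
    · intro x
      rw [pvContainsFoldl]
      simp
    · intro x hx
      rw [pvContainsFoldl] at hx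
      rw [pvGetDFoldl]
      by_cases hxQ : x ∈ Q
      · simp only [hxQ, if_true]
        exact (hresQ x hxQ).symm
      · simp only [hxQ, if_false]
        have hxm : m.contains x = true := by
          simp [hxQ] at hx
          exact hx
        exact (hval x hxm).2.1
  · have hmw' : m.contains w = false := by simpa using hmw
    rw [if_neg hmw]
    by_cases hQw : w ∈ Q
    · -- branch 2: the walk closed a cycle at w ∈ Q
      rw [if_pos (by simpa using hQw)]
      obtain ⟨B₁, B₂, hB⟩ := List.append_of_mem hQw
      have hndB : (B₁ ++ w :: B₂).Nodup := hB ▸ hndQ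
      obtain ⟨hndB₁, hndwB₂, hdisj⟩ := List.nodup_append.mp hndB
      have hwB₁ : w ∉ B₁ := fun hin => hdisj w hin w (by simp) rfl
      have hwB₂ : w ∉ B₂ := (List.nodup_cons.mp hndwB₂).1
      have hwd : d.contains w = true := (helem w hQw).1
      have hresB₁ : ∀ q ∈ B₁, pvResA d q = w := by
        intro q hq
        obtain ⟨X, Y, hXY⟩ := List.append_of_mem hq
        have hsp : Q = X ++ q :: (Y ++ w :: B₂) := by rw [hB, hXY]; simp
        have hVal := hvalQ X q (Y ++ w :: B₂) hsp
        rw [pvAWalk_stop_mem d _ w (by simp)] at hVal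
        exact hVal
      have hresB₂ : ∀ q ∈ w :: B₂, pvResA d q = q := by
        intro q hq
        rcases List.mem_cons.mp hq with rfl | hq'
        · have hVal := hvalQ B₁ q B₂ hB
          rw [pvAWalk_stop_mem d _ q (by simp)] at hVal
          exact hVal
        · obtain ⟨C₁, C₂, hC⟩ := List.append_of_mem hq'
          have hsp : Q = (B₁ ++ w :: C₁) ++ q :: C₂ := by rw [hB, hC]; simp
          have hVal := hvalQ (B₁ ++ w :: C₁) q C₂ hsp
          have hqw : q ≠ w := by rintro rfl; exact hwB₂ hq'
          have hwn : w ∉ q :: C₂ := by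
            intro hin
            rcases List.mem_cons.mp hin with h' | h'
            · exact hqw h'.symm
            · exact hwB₂ (by rw [hC]; exact List.mem_append_right _ (List.mem_cons_of_mem _ h'))
          rw [pvAWalk_step d (q :: C₂) w hwd hwn] at hVal
          have hafter := pvCW_after d m [] k B₁ w B₂ (by rw [h1, hB])
          rw [h2] at hafter
          have hfollow := pvFollow d m (([] ++ B₁) ++ [w]) (d.getD w 0) ((q :: C₂) ++ [w])
          rw [hafter.1, hafter.2] at hfollow
          have hndB₂ : (C₁ ++ q :: C₂).Nodup := hC ▸ (List.nodup_cons.mp hndwB₂).2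
          obtain ⟨hndC₁, hndqC₂, hdisj₂⟩ := List.nodup_append.mp hndB₂
          have hfind : B₂.find? (fun x => ((q :: C₂) ++ [w]).contains x) = some q := by
            rw [hC, List.find?_append]
            have hC₁none : C₁.find? (fun x => ((q :: C₂) ++ [w]).contains x) = none := by
              apply List.find?_eq_none.mpr
              intro x hx
              have hxq : x ∉ q :: C₂ := fun hin => hdisj₂ x hx x hin rfl
              have hxw : x ≠ w := by
                rintro rfl
                exact hwB₂ (by rw [hC]; exact List.mem_append_left _ hx)
              simp only [List.mem_cons, not_or] at hxq
              simp [List.contains_append, hxq.1, hxq.2, hxw]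
            rw [hC₁none, Option.none_or]
            have : ((q :: C₂) ++ [w]).contains q = true := by simp
            simp [List.find?_cons, this]
          rw [hfind] at hfollow
          rw [hVal, hfollow]
      have hidx : PySem.List.index? Q w = some B₁.length := by
        rw [hB]; exact pvIndexAppend B₁ B₂ w hwB₁
      rw [hidx]
      simp only [Option.getD_some]
      rw [PySem.List.slice_to_natCast, PySem.List.slice_from_natCast, hB,
        List.take_left, List.drop_left]
      have hQmem : ∀ x : Int, x ∈ Q ↔ (x ∈ w :: B₂ ∨ x ∈ B₁) := by
        intro x
        rw [hB]
        simp [or_comm]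
      refine hmk _ (Or.inr (Or.inl hQw)) ?_ ?_ ?_
      · exact pvNodupFoldl (w :: B₂) _ _ (pvNodupFoldl B₁ _ m hndm)
      · intro x
        rw [pvContainsFoldl, pvContainsFoldl, hQmem x]
        simp [or_assoc]
      · intro x hx
        rw [pvGetDFoldl, pvGetDFoldl]
        by_cases hx2 : x ∈ w :: B₂
        · simp only [hx2, if_true]
          exact (hresB₂ x hx2).symm
        · simp only [hx2, if_false]
          by_cases hx1 : x ∈ B₁
          · simp only [hx1, if_true]
            exact (hresB₁ x hx1).symm
          · simp only [hx1, if_false]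
            rw [pvContainsFoldl, pvContainsFoldl] at hx
            have hxm : m.contains x = true := by
              simp [hx1, hx2] at hx
              exact hx
            exact (hval x hxm).2.1
    · -- branch 3: the walk left the keys of the mapping
      rw [if_neg (by simpa using hQw)]
      have hwd : d.contains w = false := by
        by_contra h'
        have h'' : d.contains w = true := by simpa using h'
        have hexit := pvCW_exit d m [] k (by rw [h2]; exact h'')
        rw [h1, h2] at hexit
        rcases hexit with hh | hh
        · exact hQw (by simpa using hh)
        · rw [hmw'] at hh; exact absurd hh (by simp)
      have hresQ : ∀ q ∈ Q, pvResA d q = w := by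
        intro q hq
        obtain ⟨Q₁, Q₂, hsp⟩ := List.append_of_mem hq
        have hVal := hvalQ Q₁ q Q₂ hsp
        rw [pvAWalk_stop_not_key d _ w hwd] at hVal
        exact hVal
      refine hmk _ (Or.inl hwd) (pvNodupFoldl Q _ m hndm) ?_ ?_
      · intro x
        rw [pvContainsFoldl]
        simp
      · intro x hx
        rw [pvContainsFoldl] at hx
        rw [pvGetDFoldl]
        by_cases hxQ : x ∈ Q
        · simp only [hxQ, if_true]
          exact (hresQ x hxQ).symm
        · simp only [hxQ, if_false]
          have hxm : m.contains x = true := by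
            simp [hxQ] at hx
            exact hx
          exact (hval x hxm).2.1

theorem pvBFold (d : PySem.Dict Int Int) :
    ∀ (ks : List Int) (m fin : PySem.Dict Int Int),
      pvInv d m → (∀ k ∈ ks, d.contains k = true) → ks.Nodup →
      (∀ k ∈ ks, fin.contains k = false) → fin.keys.Nodup →
      ((ks.foldl (pvBStep d) (m, fin)).2).items =
        fin.items ++ ks.map (fun k => (k, pvResA d k)) := by
  intro ks
  induction ks with
  | nil => intro m fin _ _ _ _ _; simp
  | cons k t ih =>
    intro m fin hInv hks hnd hfin hfnd
    simp only [List.foldl_cons, pvBStep]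
    have hm₁ : pvInv d (if m.contains k then m else pvBResolve d m k) ∧
        (if m.contains k then m else pvBResolve d m k).contains k = true := by
      by_cases h : m.contains k = true
      · rw [if_pos h]
        exact ⟨hInv, h⟩
      · rw [if_neg h]
        exact pvResolveStep d m k hInv (hks k (by simp)) (by simpa using h)
    set m₁ := if m.contains k then m else pvBResolve d m k with hm₁def
    have hv : m₁.getD k 0 = pvResA d k := (hm₁.1.2 k hm₁.2).2.1
    rw [ih m₁ (fin.insert k (m₁.getD k 0)) hm₁.1
      (fun k' h' => hks k' (List.mem_cons_of_mem _ h'))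
      (List.nodup_cons.mp hnd).2
      (fun k' h' => by
        rw [PySem.Dict.contains_insert]
        have hne : k' ≠ k := by rintro rfl; exact (List.nodup_cons.mp hnd).1 h'
        simp [hne, hfin k' (List.mem_cons_of_mem _ h')])
      (PySem.Dict.nodup_keys_insert _ _ _ hfnd)]
    rw [PySem.Dict.items_insert_of_not_contains _ _ (hfin k (by simp))]
    simp [hv]

theorem pvAFold (g : Int → Int) :
    ∀ (ks : List Int) (fin : PySem.Dict Int Int),
      (∀ k ∈ ks, fin.contains k = false) → ks.Nodup →
      (ks.foldl (fun fm key => fm.insert key (g key)) fin).items =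
        fin.items ++ ks.map (fun k => (k, g k)) := by
  intro ks
  induction ks with
  | nil => intro fin _ _; simp
  | cons k t ih =>
    intro fin hf hnd
    simp only [List.foldl_cons, List.map_cons]
    rw [ih _ (fun k' hk' => by
        rw [PySem.Dict.contains_insert]
        have hne : k' ≠ k := by rintro rfl; exact (List.nodup_cons.mp hnd).1 hk'
        simp [hne, hf k' (List.mem_cons_of_mem _ hk')])
      (List.nodup_cons.mp hnd).2]
    rw [PySem.Dict.items_insert_of_not_contains _ _ (hf k (by simp))]
    simp

-- ===== VERDICT (by name: the statement is the Claim_ definition above) =====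
theorem apply_transitive_mapping_py_spec : Claim_equal_apply_transitive_mapping_py := by
  intro mapping _
  unfold Spec_apply_transitive_mapping_py
  unfold apply_transitive_mapping_py apply_transitive_mapping_py_alt
  set d := PySem.Dict.ofList mapping with hd
  have hnd : d.keys.Nodup := PySem.Dict.nodup_keys_ofList mapping
  have hA := pvAFold (fun key => pvAWalk d (PySem.Set.ofList [key]) (d.getD key 0)) d.keys
    PySem.Dict.empty (by simp) hnd
  have hB := pvBFold d d.keys PySem.Dict.empty PySem.Dict.empty
    ⟨by simp, by intro x hx; simp at hx⟩
    (fun k hk => (PySem.Dict.contains_iff_mem_keys d k).mpr hk) hnd (by simp) (by simp)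
  simp only [hA, hB]
  simp [pvResA]
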